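-- pv_equiv track=rewrite | github.com/posl/comment_recommendation | script/split_gen/2_time/zh/163_D/5.py | solve
-- ===== SOURCE A (Python) =====
-- def solve(n,k):
--     mod=10**9+7
--     sum=0
--     for i in range(k,n+2):
--         min=i*(i-1)//2
--         max=i*(2*n-i+1)//2
--         sum=(sum+max-min+1)%mod
--     return sum
-- ===== SOURCE B (Python) =====
-- def solve(n, k):
--     # Closed form: each loop term of A equals i*(n-i+1)+1, so the whole sum is
--     # (n+1)*S1 - S2 + count with S1, S2 the power sums over i = k..n+1.
--     mod = 10**9 + 7
--     b = n + 1
--     if b < k: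
--         return 0
--     count = b - k + 1
--     s1 = (b * (b + 1) - (k - 1) * k) // 2
--     s2 = (b * (b + 1) * (2 * b + 1) - (k - 1) * k * (2 * k - 1)) // 6
--     return ((n + 1) * s1 - s2 + count) % mod
-- ===== Notes on version B (the rewrite author's own statement) =====
-- stated objective: faster
-- what changed: Replaced A's O(n) loop accumulating per-length subarray counts mod 1e9+7 with a closed-form evaluation using the power-sum formulas for sum i and sum i^2 over i=k..n+1, taking the modulus once at the end.
import Mathlib
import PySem

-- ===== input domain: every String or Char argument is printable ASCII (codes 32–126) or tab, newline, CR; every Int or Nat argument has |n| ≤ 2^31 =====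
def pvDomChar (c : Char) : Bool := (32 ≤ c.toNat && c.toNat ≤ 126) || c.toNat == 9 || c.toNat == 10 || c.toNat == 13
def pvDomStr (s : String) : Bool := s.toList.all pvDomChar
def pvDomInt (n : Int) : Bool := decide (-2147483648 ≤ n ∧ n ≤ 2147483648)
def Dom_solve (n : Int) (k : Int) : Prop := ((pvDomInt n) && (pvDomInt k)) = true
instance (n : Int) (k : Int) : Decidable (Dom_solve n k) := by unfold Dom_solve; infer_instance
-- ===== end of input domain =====

-- B replaces A's O(n) modular accumulation loop by an O(1) closed form built from the
-- power-sum formulas for Σ i and Σ i² over i = k..n+1 (objective: faster, asymptotic).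

-- ===== PORT A =====
def solve (n : Int) (k : Int) : Int :=
  (PySem.List.pyRange k (n + 2) 1).foldl
    (fun sum i =>
      let min := PySem.Int.floordiv (i * (i - 1)) 2
      let max := PySem.Int.floordiv (i * (2 * n - i + 1)) 2
      PySem.Int.mod (sum + max - min + 1) 1000000007)
    0

-- ===== PORT B =====
def solve_alt (n : Int) (k : Int) : Int :=
  let mod : Int := 1000000007
  let b := n + 1
  if b < k then 0
  else
    let count := b - k + 1
    let s1 := PySem.Int.floordiv (b * (b + 1) - (k - 1) * k) 2
    let s2 := PySem.Int.floordiv (b * (b + 1) * (2 * b + 1) - (k - 1) * k * (2 * k - 1)) 6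
    PySem.Int.mod ((n + 1) * s1 - s2 + count) mod

-- ===== PRECONDITION & SPEC =====
def Spec_solve (n : Int) (k : Int) (out : Int) : Prop := out = solve_alt n k
instance (n : Int) (k : Int) (out : Int) : Decidable (Spec_solve n k out) := by unfold Spec_solve; infer_instance

-- ===== CLAIM (what is proved, stated in full; the proofs are below) =====
def Claim_equal_solve : Prop := ∀ (n : Int) (k : Int), Dom_solve n k → Spec_solve n k (solve n k)

-- ===== LEMMAS AND PROOFS =====

-- the modular fold over any list equals a single mod of the plain sum
lemma foldl_mod_sum (f : Int → Int) :
    ∀ (l : List Int) (s : Int),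
      l.foldl (fun acc i => PySem.Int.mod (acc + f i) 1000000007) (PySem.Int.mod s 1000000007)
        = PySem.Int.mod (s + (l.map f).sum) 1000000007 := by
  intro l
  induction l with
  | nil => intro s; simp
  | cons x t ih =>
      intro s
      have hpos : (0:Int) < 1000000007 := by norm_num
      have hstep : PySem.Int.mod (PySem.Int.mod s 1000000007 + f x) 1000000007
          = PySem.Int.mod (s + f x) 1000000007 := by
        rw [PySem.Int.mod_eq_emod_of_pos hpos, PySem.Int.mod_eq_emod_of_pos hpos,
            PySem.Int.mod_eq_emod_of_pos hpos, Int.emod_add_emod]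
      simp only [List.foldl_cons, List.map_cons, List.sum_cons, hstep]
      rw [ih (s + f x)]
      congr 1
      ring

lemma floordiv_two_exact (c : Int) : PySem.Int.floordiv (c + c) 2 = c := by
  rw [PySem.Int.floordiv_eq_iff_of_pos (by norm_num)]; omega

lemma floordiv_six_exact (c : Int) : PySem.Int.floordiv (6 * c) 6 = c := by
  rw [PySem.Int.floordiv_eq_iff_of_pos (by norm_num)]; omega

-- each loop term of A is i*(n-i+1)+1
lemma term_eq (n i : Int) :
    PySem.Int.floordiv (i * (2 * n - i + 1)) 2 - PySem.Int.floordiv (i * (i - 1)) 2 + 1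
      = i * (n - i + 1) + 1 := by
  rcases Int.even_or_odd i with ⟨c, hc⟩ | ⟨c, hc⟩ <;> subst hc
  · rw [show (c + c) * ((c + c) - 1) = c * (2 * c - 1) + c * (2 * c - 1) by ring,
        show (c + c) * (2 * n - (c + c) + 1) = c * (2 * n - 2 * c + 1) + c * (2 * n - 2 * c + 1) by ring,
        floordiv_two_exact, floordiv_two_exact]
    ring
  · rw [show (2 * c + 1) * ((2 * c + 1) - 1) = (2 * c + 1) * c + (2 * c + 1) * c by ring,
        show (2 * c + 1) * (2 * n - (2 * c + 1) + 1) = (2 * c + 1) * (n - c) + (2 * c + 1) * (n - c) by ring,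
        floordiv_two_exact, floordiv_two_exact]
    ring

lemma six_dvd_sq_sum_poly (x : Int) : (6 : Int) ∣ x * (x + 1) * (2 * x + 1) := by
  have h2 : (2 : Int) ∣ x * (x + 1) * (2 * x + 1) := by
    rcases Int.even_or_odd x with ⟨c, hc⟩ | ⟨c, hc⟩
    · exact ⟨c * (x + 1) * (2 * x + 1), by rw [hc]; ring⟩
    · exact ⟨x * (c + 1) * (2 * x + 1), by rw [hc]; ring⟩
  have h3 : (3 : Int) ∣ x * (x + 1) * (2 * x + 1) := by
    have hm : x % 3 = 0 ∨ x % 3 = 1 ∨ x % 3 = 2 := by omega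
    obtain ⟨q, hq⟩ : ∃ q, x = 3 * q + x % 3 := ⟨x / 3, by omega⟩
    rcases hm with h | h | h <;> rw [h] at hq
    · exact ⟨q * (x + 1) * (2 * x + 1), by rw [hq]; ring⟩
    · exact ⟨x * (x + 1) * (2 * q + 1), by rw [hq]; ring⟩
    · exact ⟨x * (q + 1) * (2 * x + 1), by rw [hq]; ring⟩
  obtain ⟨a, ha⟩ := h2
  obtain ⟨b, hb⟩ := h3
  omega

-- closed form of the plain (un-modded) sum, scaled by 6 to stay in integers
lemma sum_closed (n : Int) :
    ∀ (d : Nat) (k : Int),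
      6 * (((PySem.List.pyRange k (k + d) 1).map (fun i => i * (n - i + 1) + 1)).sum)
        = 3 * (n + 1) * ((k + d - 1) * (k + d) - (k - 1) * k)
          - ((k + d - 1) * (k + d) * (2 * (k + d) - 1) - (k - 1) * k * (2 * k - 1))
          + 6 * d := by
  intro d
  induction d with
  | zero =>
      intro k
      rw [show ((0:Nat):Int) = 0 by norm_num]
      rw [PySem.List.pyRange_one_eq_nil (by omega)]
      simp only [List.map_nil, List.sum_nil]
      push_cast; ring
  | succ d ih =>
      intro k
      have hrw : k + ((d:Nat) + 1 : Nat) = (k + d) + 1 := by push_cast; ring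
      rw [hrw, PySem.List.pyRange_one_succ_right (by omega)]
      simp only [List.map_append, List.map_cons, List.map_nil, List.sum_append,
        List.sum_cons, List.sum_nil]
      have := ih k
      push_cast at this ⊢
      linear_combination this

-- ===== VERDICT (by name: the statement is the Claim_ definition above) =====
theorem solve_spec : Claim_equal_solve := by
  intro n k _
  unfold Spec_solve solve solve_alt
  by_cases hlt : n + 1 < k
  · -- empty range on both sides
    rw [PySem.List.pyRange_one_eq_nil (by omega)]
    simp [hlt]
  · simp only [hlt, if_false]
    rw [not_lt] at hlt
    -- A's fold as one mod of a plain sum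
    have hfold := foldl_mod_sum
      (fun i => PySem.Int.floordiv (i * (2 * n - i + 1)) 2
        - PySem.Int.floordiv (i * (i - 1)) 2 + 1)
      (PySem.List.pyRange k (n + 2) 1) 0
    have hz : PySem.Int.mod (0:Int) 1000000007 = 0 := by decide
    rw [hz] at hfold
    have hfun : (fun (sum i : Int) =>
        let min := PySem.Int.floordiv (i * (i - 1)) 2
        let max := PySem.Int.floordiv (i * (2 * n - i + 1)) 2
        PySem.Int.mod (sum + max - min + 1) 1000000007)
      = (fun (acc i : Int) => PySem.Int.mod (acc + (PySem.Int.floordiv (i * (2 * n - i + 1)) 2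
          - PySem.Int.floordiv (i * (i - 1)) 2 + 1)) 1000000007) := by
      funext acc i; simp only []; congr 1; ring
    rw [hfun, hfold]
    -- rewrite the summand with term_eq
    have hmap : (PySem.List.pyRange k (n + 2) 1).map
        (fun i => PySem.Int.floordiv (i * (2 * n - i + 1)) 2
          - PySem.Int.floordiv (i * (i - 1)) 2 + 1)
        = (PySem.List.pyRange k (n + 2) 1).map (fun i => i * (n - i + 1) + 1) := by
      apply List.map_congr_left
      intro i _
      exact term_eq n i
    rw [hmap]
    -- evaluate B's divisions exactly
    obtain ⟨c, hc⟩ : ∃ c, (n + 1) * (n + 1 + 1) - (k - 1) * k = c + c := by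
      rcases Int.even_mul_succ_self (n + 1) with ⟨a, ha⟩
      rcases Int.even_mul_succ_self (k - 1) with ⟨b, hb⟩
      exact ⟨a - b, by linear_combination ha - hb⟩
    obtain ⟨e, he⟩ : ∃ e, (n + 1) * (n + 1 + 1) * (2 * (n + 1) + 1)
        - (k - 1) * k * (2 * k - 1) = 6 * e := by
      obtain ⟨a, ha⟩ := six_dvd_sq_sum_poly (n + 1)
      obtain ⟨b, hb⟩ := six_dvd_sq_sum_poly (k - 1)
      exact ⟨a - b, by linear_combination ha - hb⟩
    rw [hc, floordiv_two_exact, he, floordiv_six_exact]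
    -- the closed form of the sum
    set d : Nat := (n + 2 - k).toNat with hd
    have hdk : k + (d : Int) = n + 2 := by omega
    have hsum := sum_closed n d k
    rw [hdk] at hsum
    have hdint : (d : Int) = n + 2 - k := by omega
    rw [hdint] at hsum
    have hS6 : 6 * ((PySem.List.pyRange k (n + 2) 1).map (fun i => i * (n - i + 1) + 1)).sum
        = 6 * ((n + 1) * c - e + (n + 1 - k + 1)) := by
      linear_combination hsum + 3 * (n + 1) * hc - he
    have hS := mul_left_cancel₀ (by norm_num : (6:Int) ≠ 0) hS6
    rw [zero_add, hS]
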